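-- pv_equiv track=rewrite | github.com/theislab/paperbee | papers/slack_papers_formatter.py | format_papers_for_slack
-- ===== SOURCE A (Python) =====
-- from typing import List, Tuple, Any
--
-- def format_papers_for_slack(
--     papers_list: List[List[str]],
-- ) -> Tuple[List[str], List[str]]:
--     papers = []
--     preprints = []
--     for paper in papers_list:
--         emoji = ":pencil:" if paper[3] == "TRUE" else ":rolled_up_newspaper:"
--         formatted_paper = f"{emoji} <{paper[-1]}|{paper[4]}>"
--         if paper[3] == "TRUE":
--             preprints.append(formatted_paper)
--         else:
--             papers.append(formatted_paper)
--
--     return papers, preprints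
-- ===== SOURCE B (Python) =====
-- from typing import List, Tuple
--
-- def format_papers_for_slack(
--     papers_list: List[List[str]],
-- ) -> Tuple[List[str], List[str]]:
--     # Stable-sort the rows by the preprint flag (papers first, preprints last),
--     # count the papers, and split the sorted list at that point; stability
--     # preserves the original per-bucket order, so this equals A's partition.
--     ordered = sorted(papers_list, key=lambda p: p[3] == "TRUE")
--     k = len(papers_list) - sum(p[3] == "TRUE" for p in papers_list)
--     papers = [f":rolled_up_newspaper: <{p[-1]}|{p[4]}>" for p in ordered[:k]]
--     preprints = [f":pencil: <{p[-1]}|{p[4]}>" for p in ordered[k:]]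
--     return papers, preprints
-- ===== Notes on version B (the rewrite author's own statement) =====
-- stated objective: alternative
-- what changed: Instead of one dispatching loop appending into two buckets, B stable-sorts the rows by the preprint flag, counts the non-preprints, splits the sorted list at that position and formats each half with a fixed emoji; stability of the sort preserves per-bucket order.
import Mathlib
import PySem

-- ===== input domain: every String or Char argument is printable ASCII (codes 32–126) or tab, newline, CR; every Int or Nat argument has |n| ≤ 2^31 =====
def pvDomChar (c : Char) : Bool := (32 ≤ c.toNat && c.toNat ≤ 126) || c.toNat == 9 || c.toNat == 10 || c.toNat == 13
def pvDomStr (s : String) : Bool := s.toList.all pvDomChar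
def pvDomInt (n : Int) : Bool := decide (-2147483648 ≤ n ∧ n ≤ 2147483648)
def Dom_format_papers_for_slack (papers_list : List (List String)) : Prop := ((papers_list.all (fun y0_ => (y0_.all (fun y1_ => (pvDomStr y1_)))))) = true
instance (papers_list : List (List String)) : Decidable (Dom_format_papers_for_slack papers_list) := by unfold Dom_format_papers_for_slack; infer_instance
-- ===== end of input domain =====

-- B partitions by stable-sorting the rows on the preprint flag and splitting at the paper count, instead of A's single dispatching loop; objective: alternative algorithm.


-- ===== PORT A =====
-- paper[i]: Python raises IndexError on out-of-range; Pre_ excludes those inputs, so .getD "" is never reached there.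
def pvIdx (paper : List String) (i : Int) : String := (PySem.List.pyGet? paper i).getD ""

def format_papers_for_slack (papers_list : List (List String)) : List String × List String :=
  papers_list.foldl
    (fun acc paper =>
      let emoji := if pvIdx paper 3 == "TRUE" then ":pencil:" else ":rolled_up_newspaper:"
      let formatted_paper := emoji ++ " <" ++ pvIdx paper (-1) ++ "|" ++ pvIdx paper 4 ++ ">"
      if pvIdx paper 3 == "TRUE" then (acc.1, acc.2 ++ [formatted_paper])
      else (acc.1 ++ [formatted_paper], acc.2))
    ([], [])

-- ===== PORT B =====
-- Python's sort key `p[3] == "TRUE"` is a bool ordered False < True; ported as the Int 0/1.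
def altKey (p : List String) : Int := if pvIdx p 3 == "TRUE" then 1 else 0

def format_papers_for_slack_alt (papers_list : List (List String)) : List String × List String :=
  let ordered := PySem.List.sorted papers_list altKey
  let k := papers_list.length - papers_list.countP (fun p => pvIdx p 3 == "TRUE")
  ((ordered.take k).map (fun p => ":rolled_up_newspaper: <" ++ pvIdx p (-1) ++ "|" ++ pvIdx p 4 ++ ">"),
   (ordered.drop k).map (fun p => ":pencil: <" ++ pvIdx p (-1) ++ "|" ++ pvIdx p 4 ++ ">"))

-- ===== PRECONDITION & SPEC =====
-- Pre_ excludes exactly the inputs where Python A raises IndexError: a row shorter than 5 (indices 3, 4 and -1 are read).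
def Pre_format_papers_for_slack (papers_list : List (List String)) : Prop :=
  ∀ paper ∈ papers_list, 5 ≤ paper.length
instance (papers_list : List (List String)) : Decidable (Pre_format_papers_for_slack papers_list) := by
  unfold Pre_format_papers_for_slack; infer_instance

def pvWitness_format_papers_for_slack : List (List String) :=
  [["a", "b", "c", "TRUE", "Title", "url"]]

def Spec_format_papers_for_slack (papers_list : List (List String)) (out : List String × List String) : Prop := out = format_papers_for_slack_alt papers_list
instance (papers_list : List (List String)) (out : List String × List String) : Decidable (Spec_format_papers_for_slack papers_list out) := by unfold Spec_format_papers_for_slack; infer_instance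

-- ===== CLAIM (what is proved, stated in full; the proofs are below) =====
def Claim_equal_format_papers_for_slack : Prop := ∀ (papers_list : List (List String)), Dom_format_papers_for_slack papers_list → Pre_format_papers_for_slack papers_list → Spec_format_papers_for_slack papers_list (format_papers_for_slack papers_list)

-- ===== LEMMAS AND PROOFS =====

-- A's fold appends the two filtered-and-mapped buckets behind the running accumulator.
lemma foldA_eq (papers_list : List (List String)) (acc : List String × List String) :
    papers_list.foldl
      (fun acc paper =>
        let emoji := if pvIdx paper 3 == "TRUE" then ":pencil:" else ":rolled_up_newspaper:"
        let formatted_paper := emoji ++ " <" ++ pvIdx paper (-1) ++ "|" ++ pvIdx paper 4 ++ ">"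
        if pvIdx paper 3 == "TRUE" then (acc.1, acc.2 ++ [formatted_paper])
        else (acc.1 ++ [formatted_paper], acc.2))
      acc
    = (acc.1 ++ (papers_list.filter (fun p => !(pvIdx p 3 == "TRUE"))).map
          (fun p => ":rolled_up_newspaper: <" ++ pvIdx p (-1) ++ "|" ++ pvIdx p 4 ++ ">"),
       acc.2 ++ (papers_list.filter (fun p => pvIdx p 3 == "TRUE")).map
          (fun p => ":pencil: <" ++ pvIdx p (-1) ++ "|" ++ pvIdx p 4 ++ ">")) := by
  induction papers_list generalizing acc with
  | nil => simp
  | cons p ps ih =>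
    rw [List.foldl_cons, ih]
    by_cases h : pvIdx p 3 = "TRUE" <;> simp [h]

-- A key-1 element is inserted at the very end (it is never strictly below any key).
lemma ins_one (x : List String) (ys : List (List String)) (hx : altKey x = 1) :
    PySem.List.insertBy (fun a b => decide (altKey a < altKey b)) x ys = ys ++ [x] := by
  apply PySem.List.insertBy_of_forall_not_before
  intro y _
  have : altKey y ≤ 1 := by unfold altKey; split <;> simp
  simp [hx]; omega

-- A key-0 element is inserted after the key-0 block and before the key-1 block.
lemma ins_zero (A0 A1 : List (List String)) (x : List String)
    (h0 : ∀ a ∈ A0, altKey a = 0) (h1 : ∀ a ∈ A1, altKey a = 1) (hx : altKey x = 0) :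
    PySem.List.insertBy (fun a b => decide (altKey a < altKey b)) x (A0 ++ A1) = A0 ++ x :: A1 := by
  induction A0 with
  | nil =>
    cases A1 with
    | nil => simp [PySem.List.insertBy]
    | cons h t =>
      have hh : altKey h = 1 := h1 h (by simp)
      simp [PySem.List.insertBy, hx, hh]
  | cons a t ih =>
    have ha : altKey a = 0 := h0 a (by simp)
    have := ih (fun b hb => h0 b (by simp [hb]))
    simp [PySem.List.insertBy, hx, ha] at this ⊢
    exact this

-- The stable insertion-sort fold by the binary key produces filter-0 ++ filter-1.
lemma foldl_ins (l A0 A1 : List (List String))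
    (h0 : ∀ a ∈ A0, altKey a = 0) (h1 : ∀ a ∈ A1, altKey a = 1) :
    l.foldl (fun acc x => PySem.List.insertBy (fun a b => decide (altKey a < altKey b)) x acc) (A0 ++ A1)
    = (A0 ++ l.filter (fun p => !(pvIdx p 3 == "TRUE"))) ++ (A1 ++ l.filter (fun p => pvIdx p 3 == "TRUE")) := by
  induction l generalizing A0 A1 with
  | nil => simp
  | cons x xs ih =>
    by_cases h : pvIdx x 3 = "TRUE"
    · have hx : altKey x = 1 := by simp [altKey, h]
      have step : PySem.List.insertBy (fun a b => decide (altKey a < altKey b)) x (A0 ++ A1)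
          = A0 ++ (A1 ++ [x]) := by rw [ins_one x _ hx]; simp
      have h1' : ∀ a ∈ A1 ++ [x], altKey a = 1 := by
        intro a ha
        rcases List.mem_append.1 ha with h' | h'
        · exact h1 a h'
        · simp at h'; simpa [h'] using hx
      rw [List.foldl_cons, step, ih A0 (A1 ++ [x]) h0 h1']
      simp [h]
    · have hx : altKey x = 0 := by simp [altKey, h]
      have step : PySem.List.insertBy (fun a b => decide (altKey a < altKey b)) x (A0 ++ A1)
          = (A0 ++ [x]) ++ A1 := by rw [ins_zero A0 A1 x h0 h1 hx]; simp
      have h0' : ∀ a ∈ A0 ++ [x], altKey a = 0 := by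
        intro a ha
        rcases List.mem_append.1 ha with h' | h'
        · exact h0 a h'
        · simp at h'; simpa [h'] using hx
      rw [List.foldl_cons, step, ih (A0 ++ [x]) A1 h0' h1]
      simp [h]

-- sorted by the flag = non-preprints (in order) ++ preprints (in order): stability of the sort.
lemma sorted_split (l : List (List String)) :
    PySem.List.sorted l altKey
    = l.filter (fun p => !(pvIdx p 3 == "TRUE")) ++ l.filter (fun p => pvIdx p 3 == "TRUE") := by
  rw [PySem.List.sorted_eq_foldl_insertBy]
  simpa using foldl_ins l [] [] (by simp) (by simp)

-- the split point equals the length of the non-preprint block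
lemma k_eq (l : List (List String)) :
    l.length - l.countP (fun p => pvIdx p 3 == "TRUE")
    = (l.filter (fun p => !(pvIdx p 3 == "TRUE"))).length := by
  induction l with
  | nil => simp
  | cons x xs ih =>
    have hc := List.countP_le_length (p := fun p => pvIdx p 3 == "TRUE") (l := xs)
    by_cases h : pvIdx x 3 = "TRUE" <;>
      simp [h] <;> omega

-- ===== VERDICT (by name: the statement is the Claim_ definition above) =====
theorem format_papers_for_slack_spec : Claim_equal_format_papers_for_slack := by
  intro papers_list _ _
  unfold Spec_format_papers_for_slack format_papers_for_slack format_papers_for_slack_alt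
  rw [foldA_eq papers_list ([], []), sorted_split, k_eq]
  simp
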